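-- pv_equiv track=rewrite | github.com/D0rm1nL3v1t4n/Base-Converter | EncodeFunc.py | GetListBaseValues
-- ===== SOURCE A (Python) =====
-- def GetListBaseValues(base, decimalCharacters):
--     baseValues = []
--     for asciiValue in decimalCharacters:
--         newValue = ""
--         for bit in (GetNewBaseValue(asciiValue, base, GetIterationCount(base),[])):
--             newValue += ChangeToAsciiCharVal(base, bit)
--         baseValues.append(newValue)
--     return baseValues
--
-- def GetNewBaseValue(asciiVal,base,counter,bits):
--     if counter < 0:
--         return bits
--     else:
--         quotient = asciiVal // base**counter
--         remainder = asciiVal % base**counter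
--         bits.insert(len(bits),str(quotient))
--         return GetNewBaseValue(remainder,base,counter - 1,bits)
--
-- def ChangeToAsciiCharVal(base, num):
--     characters = ["0","1","2","3","4","5","6","7","8","9","A","B","C","D","E","F","G","H","I","J","K","L","M","N","O","P","Q","R","S","T","U","V","W","X","Y","Z","a","b","c","d","e","f","g","h","i","j","k","l","m","n","o","p","q","r","s","t","u","v","w","x","y","z","+","/"]
--     return characters[int(num)]
--
-- def GetIterationCount(base):
--     if (base == 2):
--         return 7
--     elif (base == 3):
--         return 5
--     elif (base < 6):
--         return 4
--     elif (base < 12):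
--         return 3
--     else:
--         return 2
-- ===== SOURCE B (Python) =====
-- def GetIterationCount(base):
--     if (base == 2):
--         return 7
--     elif (base == 3):
--         return 5
--     elif (base < 6):
--         return 4
--     elif (base < 12):
--         return 3
--     else:
--         return 2
--
-- def GetListBaseValues(base, decimalCharacters):
--     characters = "0123456789ABCDEFGHIJKLMNOPQRSTUVWXYZabcdefghijklmnopqrstuvwxyz+/"
--     n = GetIterationCount(base)
--     baseValues = []
--     for value in decimalCharacters:
--         digits = []
--         power = 1
--         for _ in range(n):
--             digits.append(value % (power * base) // power)
--             power *= base
--         digits.append(value // power)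
--         encoded = ""
--         for d in reversed(digits):
--             encoded += characters[d]
--         baseValues.append(encoded)
--     return baseValues
-- ===== Notes on version B (the rewrite author's own statement) =====
-- stated objective: alternative
-- what changed: Replaces A's MSB-first recursion (which recomputes base**counter at every level, inserts into a carried list, and round-trips every digit through str()/int()) with a single LSB-first loop keeping a running power accumulator, a reversed digit list, and direct indexing into one character string.
import Mathlib
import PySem

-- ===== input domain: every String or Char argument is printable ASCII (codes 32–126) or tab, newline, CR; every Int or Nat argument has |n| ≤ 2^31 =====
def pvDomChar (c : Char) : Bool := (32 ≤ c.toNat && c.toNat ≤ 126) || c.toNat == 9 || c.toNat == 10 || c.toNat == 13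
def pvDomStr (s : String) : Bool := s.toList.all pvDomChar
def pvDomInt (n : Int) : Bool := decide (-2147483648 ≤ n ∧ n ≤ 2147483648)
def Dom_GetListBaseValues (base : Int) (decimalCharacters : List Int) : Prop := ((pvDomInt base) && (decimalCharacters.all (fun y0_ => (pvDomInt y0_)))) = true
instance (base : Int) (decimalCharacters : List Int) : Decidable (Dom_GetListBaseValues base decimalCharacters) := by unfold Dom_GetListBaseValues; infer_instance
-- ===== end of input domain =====

-- B replaces A's MSB-first recursion (with a fresh base**counter each level and a str→int
-- round-trip per digit) by one LSB-first loop with a running power and direct table indexing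
-- (objective: alternative).

-- ===== PORT A =====
def pvCharactersA : List String := ["0","1","2","3","4","5","6","7","8","9","A","B","C","D","E","F","G","H","I","J","K","L","M","N","O","P","Q","R","S","T","U","V","W","X","Y","Z","a","b","c","d","e","f","g","h","i","j","k","l","m","n","o","p","q","r","s","t","u","v","w","x","y","z","+","/"]

-- characters[int(num)]; int(num) never fails here (num is str of an int); the pyGet? none
-- case is Python's IndexError, excluded by Pre_.
def ChangeToAsciiCharVal (base : Int) (num : String) : String :=
  (PySem.List.pyGet? pvCharactersA ((PySem.Int.ofStr? num).getD 0)).getD ""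

def GetIterationCount (base : Int) : Int :=
  if base = 2 then 7
  else if base = 3 then 5
  else if base < 6 then 4
  else if base < 12 then 3
  else 2

def GetNewBaseValue (asciiVal base counter : Int) (bits : List String) : List String :=
  if counter < 0 then bits
  else
    let quotient := PySem.Int.floordiv asciiVal (base ^ counter.toNat)
    let remainder := PySem.Int.mod asciiVal (base ^ counter.toNat)
    GetNewBaseValue remainder base (counter - 1)
      (PySem.List.insert bits (PySem.List.len bits) (PySem.Int.toStr quotient))
termination_by (counter + 1).toNat
decreasing_by omega

def GetListBaseValues (base : Int) (decimalCharacters : List Int) : List String :=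
  decimalCharacters.foldl (fun baseValues asciiValue =>
    let newValue := (GetNewBaseValue asciiValue base (GetIterationCount base) []).foldl
      (fun nv bit => nv ++ ChangeToAsciiCharVal base bit) ""
    baseValues ++ [newValue]) []

-- ===== PORT B =====
def pvCharactersB : String := "0123456789ABCDEFGHIJKLMNOPQRSTUVWXYZabcdefghijklmnopqrstuvwxyz+/"

-- characters[d] on a str; the pyGet? none case is Python's IndexError, excluded by Pre_.
def GetListBaseValues_alt (base : Int) (decimalCharacters : List Int) : List String :=
  let n := GetIterationCount base
  decimalCharacters.foldl (fun baseValues value =>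
    let st := (List.range n.toNat).foldl
      (fun (st : List Int × Int) _ =>
        (st.1 ++ [PySem.Int.floordiv (PySem.Int.mod value (st.2 * base)) st.2], st.2 * base))
      ([], 1)
    let digits := st.1 ++ [PySem.Int.floordiv value st.2]
    let encoded := digits.reverse.foldl
      (fun s d => s ++ (((PySem.Str.pyGet? pvCharactersB d).map (fun c => String.ofList [c])).getD "")) ""
    baseValues ++ [encoded]) []

-- ===== PRECONDITION & SPEC =====
-- spec-side copies so Pre_ does not reach the ports
def pvWidth (base : Int) : Nat :=
  if base = 2 then 7
  else if base = 3 then 5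
  else if base < 6 then 4
  else if base < 12 then 3
  else 2

-- k-th positional digit (from the least significant end) of v in base `base`
def pvDigit (base v : Int) (k : Nat) : Int :=
  PySem.Int.floordiv (PySem.Int.mod v (base ^ (k + 1))) (base ^ k)

-- Exactly the inputs on which the Python A returns: for every listed value, base ≠ 0
-- (else ZeroDivisionError) and every positional digit — including the unreduced leading
-- quotient v // base^width — indexes the 64-entry character table under Python's
-- negative-index rule, i.e. lies in [-64, 64) (else IndexError).
def Pre_GetListBaseValues (base : Int) (decimalCharacters : List Int) : Prop :=
  ∀ v ∈ decimalCharacters, base ≠ 0 ∧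
    (-64 ≤ PySem.Int.floordiv v (base ^ pvWidth base) ∧
      PySem.Int.floordiv v (base ^ pvWidth base) < 64) ∧
    (∀ k < pvWidth base, -64 ≤ pvDigit base v k ∧ pvDigit base v k < 64)

instance (base : Int) (decimalCharacters : List Int) : Decidable (Pre_GetListBaseValues base decimalCharacters) := by
  unfold Pre_GetListBaseValues; infer_instance

def pvWitness_GetListBaseValues : Int × List Int := (2, [65, 0, -3])

def Spec_GetListBaseValues (base : Int) (decimalCharacters : List Int) (out : List String) : Prop := out = GetListBaseValues_alt base decimalCharacters
instance (base : Int) (decimalCharacters : List Int) (out : List String) : Decidable (Spec_GetListBaseValues base decimalCharacters out) := by unfold Spec_GetListBaseValues; infer_instance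

-- ===== CLAIM (what is proved, stated in full; the proofs are below) =====
def Claim_equal_GetListBaseValues : Prop := ∀ (base : Int) (decimalCharacters : List Int), Dom_GetListBaseValues base decimalCharacters → Pre_GetListBaseValues base decimalCharacters → Spec_GetListBaseValues base decimalCharacters (GetListBaseValues base decimalCharacters)

-- ===== LEMMAS AND PROOFS =====

theorem pv_iter_eq_width (base : Int) : GetIterationCount base = (pvWidth base : Int) := by
  unfold GetIterationCount pvWidth
  split_ifs <;> rfl

-- Python's % is constant on residue classes of the divisor.
theorem pv_mod_congr (m x y : Int) (hm : m ≠ 0) (h : m ∣ x - y) :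
    PySem.Int.mod x m = PySem.Int.mod y m := by
  have hx := PySem.Int.floordiv_mul_add_mod x m
  have hy := PySem.Int.floordiv_mul_add_mod y m
  have hdvd : m ∣ PySem.Int.mod x m - PySem.Int.mod y m := by
    have heq : PySem.Int.mod x m - PySem.Int.mod y m
        = (x - y) - (PySem.Int.floordiv x m - PySem.Int.floordiv y m) * m := by
      linear_combination hx - hy
    rw [heq]
    exact dvd_sub h (dvd_mul_left m _)
  have hz : PySem.Int.mod x m - PySem.Int.mod y m = 0 := by
    rcases lt_trichotomy m 0 with hneg | hzero | hpos
    · have b1 : m < PySem.Int.mod x m ∧ PySem.Int.mod x m ≤ 0 := PySem.Int.mod_neg_bounds x hneg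
      have b2 : m < PySem.Int.mod y m ∧ PySem.Int.mod y m ≤ 0 := PySem.Int.mod_neg_bounds y hneg
      refine Int.eq_zero_of_abs_lt_dvd ((abs_dvd _ _).mpr hdvd) ?_
      rw [abs_of_neg hneg, abs_lt]
      constructor <;> omega
    · exact absurd hzero hm
    · have b1 : 0 ≤ PySem.Int.mod x m := PySem.Int.mod_nonneg x hpos
      have b2 : PySem.Int.mod x m < m := PySem.Int.mod_lt x hpos
      have b3 : 0 ≤ PySem.Int.mod y m := PySem.Int.mod_nonneg y hpos
      have b4 : PySem.Int.mod y m < m := PySem.Int.mod_lt y hpos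
      exact Int.eq_zero_of_abs_lt_dvd hdvd (by rw [abs_lt]; constructor <;> omega)
  omega

theorem pv_mod_absorb (base v : Int) (hb : base ≠ 0) (k m : Nat) (h : k ≤ m) :
    PySem.Int.mod (PySem.Int.mod v (base ^ m)) (base ^ k) = PySem.Int.mod v (base ^ k) := by
  apply pv_mod_congr _ _ _ (pow_ne_zero _ hb)
  have := PySem.Int.floordiv_mul_add_mod v (base ^ m)
  have h1 : PySem.Int.mod v (base ^ m) - v = -(PySem.Int.floordiv v (base ^ m) * base ^ m) := by
    omega
  rw [h1]
  exact dvd_neg.mpr (Dvd.dvd.mul_left (pow_dvd_pow base h) _)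

theorem pv_digit_absorb (base v : Int) (hb : base ≠ 0) (k c : Nat) (h : k < c) :
    pvDigit base (PySem.Int.mod v (base ^ c)) k = pvDigit base v k := by
  unfold pvDigit
  rw [pv_mod_absorb base v hb (k + 1) c (by omega)]

theorem pv_gnbv_eq (base : Int) (hb : base ≠ 0) :
    ∀ (c : Nat) (v : Int) (bits : List String),
      GetNewBaseValue v base (c : Int) bits
        = bits ++ (PySem.Int.toStr (PySem.Int.floordiv v (base ^ c)) ::
            ((List.range c).reverse.map (fun k => PySem.Int.toStr (pvDigit base v k)))) := by
  intro c
  induction c with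
  | zero =>
    intro v bits
    rw [GetNewBaseValue]
    simp [GetNewBaseValue]
    exact PySem.List.insert_len bits (PySem.Int.toStr v)
  | succ c ih =>
    intro v bits
    rw [GetNewBaseValue]
    have hc : ¬ ((c + 1 : Nat) : Int) < 0 := by omega
    rw [if_neg hc]
    have ht : (((c + 1 : Nat) : Int)).toNat = c + 1 := by omega
    have hs : ((c + 1 : Nat) : Int) - 1 = (c : Int) := by push_cast; ring
    dsimp only
    simp only [ht, hs]
    rw [PySem.List.insert_len, ih]
    have hmap : (List.range c).reverse.map
          (fun k => PySem.Int.toStr (pvDigit base (PySem.Int.mod v (base ^ (c + 1))) k))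
        = (List.range c).reverse.map (fun k => PySem.Int.toStr (pvDigit base v k)) := by
      apply List.map_congr_left
      intro k hk
      rw [pv_digit_absorb base v hb k (c + 1) (by simp at hk; omega)]
    have hrange : (List.range (c + 1)).reverse = c :: (List.range c).reverse := by
      rw [List.range_succ, List.reverse_append]; rfl
    rw [hmap, hrange]
    have hhead : PySem.Int.floordiv (PySem.Int.mod v (base ^ (c + 1))) (base ^ c)
        = pvDigit base v c := rfl
    rw [hhead]
    simp

theorem pv_alt_fold (base v : Int) :
    ∀ n : Nat,
      (List.range n).foldl
        (fun (st : List Int × Int) _ =>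
          (st.1 ++ [PySem.Int.floordiv (PySem.Int.mod v (st.2 * base)) st.2], st.2 * base))
        ([], 1)
      = ((List.range n).map (fun k => pvDigit base v k), base ^ n) := by
  intro n
  induction n with
  | zero => simp
  | succ n ih =>
    rw [List.range_succ, List.foldl_append, ih]
    simp only [List.foldl_cons, List.foldl_nil, List.map_append]
    simp [pvDigit, pow_succ]

theorem pv_piece_eq (base d : Int) (h1 : -64 ≤ d) (h2 : d < 64) :
    ChangeToAsciiCharVal base (PySem.Int.toStr d)
      = ((PySem.Str.pyGet? pvCharactersB d).map (fun c => String.ofList [c])).getD "" := by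
  interval_cases d <;> rfl

theorem pv_elem_eq (base v : Int) (hb : base ≠ 0)
    (hmsb : -64 ≤ PySem.Int.floordiv v (base ^ pvWidth base) ∧
      PySem.Int.floordiv v (base ^ pvWidth base) < 64)
    (hdig : ∀ k < pvWidth base, -64 ≤ pvDigit base v k ∧ pvDigit base v k < 64) :
    (GetNewBaseValue v base (GetIterationCount base) []).foldl
        (fun nv bit => nv ++ ChangeToAsciiCharVal base bit) ""
      = (((List.range (GetIterationCount base).toNat).foldl
            (fun (st : List Int × Int) _ =>
              (st.1 ++ [PySem.Int.floordiv (PySem.Int.mod v (st.2 * base)) st.2], st.2 * base))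
            ([], 1)).1 ++
          [PySem.Int.floordiv v (((List.range (GetIterationCount base).toNat).foldl
            (fun (st : List Int × Int) _ =>
              (st.1 ++ [PySem.Int.floordiv (PySem.Int.mod v (st.2 * base)) st.2], st.2 * base))
            ([], 1)).2)]).reverse.foldl
          (fun s d => s ++ (((PySem.Str.pyGet? pvCharactersB d).map (fun c => String.ofList [c])).getD "")) "" := by
  rw [pv_iter_eq_width, pv_gnbv_eq base hb (pvWidth base) v [], pv_alt_fold base v]
  simp only [Int.toNat_natCast, List.nil_append, List.reverse_append, List.reverse_cons,
    List.reverse_nil, List.nil_append, List.singleton_append, List.map_reverse]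
  -- both sides are folds over the same numeric digit row
  have hrow : PySem.Int.toStr (PySem.Int.floordiv v (base ^ pvWidth base)) ::
        ((List.range (pvWidth base)).map (fun k => PySem.Int.toStr (pvDigit base v k))).reverse
      = (PySem.Int.floordiv v (base ^ pvWidth base) ::
          ((List.range (pvWidth base)).map (fun k => pvDigit base v k)).reverse).map
          PySem.Int.toStr := by
    simp [List.map_reverse, List.map_map, Function.comp]
  rw [hrow, List.foldl_map]
  apply PySem.List.foldl_congr_mem
  intro acc d hd
  have hbound : -64 ≤ d ∧ d < 64 := by
    rcases List.mem_cons.mp hd with h | h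
    · subst h; exact hmsb
    · rw [List.mem_reverse, List.mem_map] at h
      obtain ⟨k, hk, rfl⟩ := h
      exact hdig k (by simpa using hk)
  rw [pv_piece_eq base d hbound.1 hbound.2]

-- ===== VERDICT (by name: the statement is the Claim_ definition above) =====
theorem GetListBaseValues_spec : Claim_equal_GetListBaseValues := by
  intro base xs _hdom hpre
  unfold Spec_GetListBaseValues GetListBaseValues GetListBaseValues_alt
  dsimp only
  rw [PySem.List.foldl_append_singleton_eq_map, PySem.List.foldl_append_singleton_eq_map]
  simp only [List.nil_append]
  apply List.map_congr_left
  intro v hv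
  obtain ⟨hb, hmsb, hdig⟩ := hpre v hv
  exact pv_elem_eq base v hb hmsb hdig
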